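-- pv_equiv track=rewrite | github.com/pytkarlz/Wartales-mod | scripts/analyze_sheets.py | nested_counts
-- ===== SOURCE A (Python) =====
-- from collections import Counter, defaultdict
--
-- def nested_counts(sheets):
--     nested = defaultdict(Counter)
--     for sheet in sheets:
--         name = sheet.get("name", "")
--         parts = name.split("@")
--         if len(parts) >= 2:
--             nested[parts[0]][parts[1]] += 1
--     return nested
-- ===== SOURCE B (Python) =====
-- from collections import Counter, defaultdict
--
-- def nested_counts(sheets):
--     keys = []
--     for sheet in sheets:
--         parts = sheet.get("name", "").split("@")
--         if len(parts) >= 2: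
--             keys.append((parts[0], parts[1]))
--     result = defaultdict(Counter)
--     for prefix in dict.fromkeys(p for p, _ in keys):
--         result[prefix] = Counter(s for p, s in keys if p == prefix)
--     return result
-- ===== Notes on version B (the rewrite author's own statement) =====
-- stated objective: alternative
-- what changed: B replaces A's single-pass incremental nested-defaultdict update with a group-by decomposition: it first extracts the list of (prefix, suffix) key pairs, then for each distinct prefix (in first-occurrence order) builds that prefix's whole inner Counter at once from the filtered suffix list.
import Mathlib
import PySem

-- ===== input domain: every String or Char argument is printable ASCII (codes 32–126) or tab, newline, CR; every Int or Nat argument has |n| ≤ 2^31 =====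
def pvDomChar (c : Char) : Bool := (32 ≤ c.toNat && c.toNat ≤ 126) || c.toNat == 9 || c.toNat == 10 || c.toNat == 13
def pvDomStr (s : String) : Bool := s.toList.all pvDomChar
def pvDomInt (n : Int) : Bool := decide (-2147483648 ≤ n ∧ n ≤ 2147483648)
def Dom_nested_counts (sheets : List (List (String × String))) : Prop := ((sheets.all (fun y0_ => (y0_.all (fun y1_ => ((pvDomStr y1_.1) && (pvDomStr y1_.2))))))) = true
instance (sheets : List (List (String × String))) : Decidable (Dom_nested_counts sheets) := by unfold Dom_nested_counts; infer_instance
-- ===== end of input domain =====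

-- B is a group-by decomposition: it extracts the (prefix, suffix) pairs, then builds each distinct
-- prefix's inner Counter wholesale from the filtered suffixes, instead of A's single-pass
-- incremental nested-defaultdict update (return value proved equal; not faster, an alternative).

-- ===== PORT A =====
def nested_counts (sheets : List (List (String × String))) : List (String × List (String × Int)) :=
  let nested : PySem.Dict String (PySem.Dict String Int) :=
    sheets.foldl (fun nested sheet =>
      let name := (PySem.Dict.ofList sheet).getD "name" ""
      let parts := (PySem.Str.split? name "@").getD []
      match parts with
      | p :: s :: _ => nested.modify p PySem.Dict.empty (fun inner => inner.modify s 0 (· + 1))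
      | _ => nested) PySem.Dict.empty
  nested.items.map (fun kv => (kv.1, kv.2.items))

-- ===== PORT B =====
def nested_counts_alt (sheets : List (List (String × String))) : List (String × List (String × Int)) :=
  let keys : List (String × String) :=
    sheets.foldl (fun ks sheet =>
      let parts := (PySem.Str.split? ((PySem.Dict.ofList sheet).getD "name" "") "@").getD []
      match parts with
      | [] => ks
      | [_] => ks
      | p :: s :: _ => ks ++ [(p, s)]) []
  -- dict.fromkeys over the prefixes = distinct prefixes in first-occurrence order
  let prefixes : List String := PySem.Set.ofList (keys.map Prod.fst)
  let result : PySem.Dict String (PySem.Dict String Int) :=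
    prefixes.foldl (fun r p =>
      r.insert p (PySem.Dict.counter ((keys.filter (fun q => q.1 == p)).map Prod.snd)))
      PySem.Dict.empty
  result.items.map (fun kv => (kv.1, kv.2.items))

-- ===== PRECONDITION & SPEC =====
def Spec_nested_counts (sheets : List (List (String × String))) (out : List (String × List (String × Int))) : Prop := out = nested_counts_alt sheets
instance (sheets : List (List (String × String))) (out : List (String × List (String × Int))) : Decidable (Spec_nested_counts sheets out) := by unfold Spec_nested_counts; infer_instance

-- ===== CLAIM (what is proved, stated in full; the proofs are below) =====
def Claim_equal_nested_counts : Prop := ∀ (sheets : List (List (String × String))), Dom_nested_counts sheets → Spec_nested_counts sheets (nested_counts sheets)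

-- ===== LEMMAS AND PROOFS =====

-- extraction of (prefix, suffix) from one sheet (proof-side helper)
def pvKey (sheet : List (String × String)) : Option (String × String) :=
  match (PySem.Str.split? ((PySem.Dict.ofList sheet).getD "name" "") "@").getD [] with
  | p :: s :: _ => some (p, s)
  | _ => none

theorem pv_foldl_key {γ : Type} (l : List (List (String × String))) (g : γ → String × String → γ)
    (init : γ) (f : γ → List (String × String) → γ)
    (hf : ∀ acc sheet, f acc sheet = match pvKey sheet with | some q => g acc q | none => acc) :
    l.foldl f init = (l.filterMap pvKey).foldl g init := by
  induction l generalizing init with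
  | nil => rfl
  | cons x t ih =>
    rw [List.foldl_cons, List.filterMap_cons, hf]
    cases h : pvKey x with
    | none => simp only []; exact ih init
    | some q => simp only [List.foldl_cons]; exact ih _

theorem pv_foldl_append (l : List (String × String)) (init : List (String × String)) :
    l.foldl (fun ks q => ks ++ [q]) init = init ++ l := by
  induction l generalizing init with
  | nil => simp
  | cons x t ih => rw [List.foldl_cons, ih]; simp

theorem pv_getD_foldl_modify {κ ν β : Type} [BEq κ] [LawfulBEq κ] [DecidableEq κ]
    (l : List β) (key : β → κ) (d0 : ν) (f : β → ν → ν) (d : PySem.Dict κ ν) (c : κ) :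
    (l.foldl (fun d x => d.modify (key x) d0 (f x)) d).getD c d0 =
      (l.filter (fun x => key x == c)).foldl (fun v x => f x v) (d.getD c d0) := by
  induction l generalizing d with
  | nil => rfl
  | cons x t ih =>
    rw [List.foldl_cons, List.filter_cons, ih]
    by_cases h : key x = c
    · simp [h]
    · simp [h, PySem.Dict.getD_modify, Ne.symm h]

-- ===== VERDICT (by name: the statement is the Claim_ definition above) =====
theorem nested_counts_spec : Claim_equal_nested_counts := by
  intro sheets _
  unfold Spec_nested_counts nested_counts nested_counts_alt
  -- rewrite both loops over sheets as loops over K := sheets.filterMap pvKey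
  have hA : ∀ (acc : PySem.Dict String (PySem.Dict String Int)) sheet,
      (let name := (PySem.Dict.ofList sheet).getD "name" ""
       let parts := (PySem.Str.split? name "@").getD []
       match parts with
       | p :: s :: _ => acc.modify p PySem.Dict.empty (fun inner => inner.modify s 0 (· + 1))
       | _ => acc)
      = match pvKey sheet with
        | some q => acc.modify q.1 PySem.Dict.empty (fun i => i.modify q.2 0 (· + 1))
        | none => acc := by
    intro acc sheet
    show (match (PySem.Str.split? ((PySem.Dict.ofList sheet).getD "name" "") "@").getD [] with
          | p :: s :: _ => acc.modify p PySem.Dict.empty (fun inner => inner.modify s 0 (· + 1))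
          | _ => acc) = _
    unfold pvKey
    generalize (PySem.Str.split? ((PySem.Dict.ofList sheet).getD "name" "") "@").getD [] = parts
    cases parts with
    | nil => rfl
    | cons a t => cases t <;> rfl
  have hB : ∀ (acc : List (String × String)) sheet,
      (let parts := (PySem.Str.split? ((PySem.Dict.ofList sheet).getD "name" "") "@").getD []
       match parts with
       | [] => acc
       | [_] => acc
       | p :: s :: _ => acc ++ [(p, s)])
      = match pvKey sheet with
        | some q => acc ++ [q]
        | none => acc := by
    intro acc sheet
    show (match (PySem.Str.split? ((PySem.Dict.ofList sheet).getD "name" "") "@").getD [] with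
          | [] => acc
          | [_] => acc
          | p :: s :: _ => acc ++ [(p, s)]) = _
    unfold pvKey
    generalize (PySem.Str.split? ((PySem.Dict.ofList sheet).getD "name" "") "@").getD [] = parts
    cases parts with
    | nil => rfl
    | cons a t => cases t <;> rfl
  rw [pv_foldl_key sheets
        (fun d q => d.modify q.1 PySem.Dict.empty (fun i => i.modify q.2 0 (· + 1)))
        PySem.Dict.empty _ hA,
      pv_foldl_key sheets (fun ks q => ks ++ [q]) [] _ hB,
      pv_foldl_append]
  rw [List.nil_append]
  dsimp only []
  set K := sheets.filterMap pvKey with hK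
  -- A's dict has Nodup keys, so its items are keys.map (k, getD k)
  have hnodA : ((K.foldl
      (fun d q => d.modify q.1 PySem.Dict.empty
        (fun (i : PySem.Dict String Int) => i.modify q.2 0 (· + 1)))
      PySem.Dict.empty)).keys.Nodup :=
    PySem.Dict.nodup_keys_foldl_modify_key _ Prod.fst PySem.Dict.empty
      (fun _ q => fun (i : PySem.Dict String Int) => i.modify q.2 0 (· + 1))
      PySem.Dict.empty PySem.Dict.nodup_keys_empty
  rw [PySem.Dict.items_eq_map_keys _ hnodA (PySem.Dict.empty : PySem.Dict String Int)]
  rw [PySem.Dict.keys_foldl_modify_key K Prod.fst PySem.Dict.empty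
        (fun _ q => fun (i : PySem.Dict String Int) => i.modify q.2 0 (· + 1)) PySem.Dict.empty]
  rw [PySem.Dict.keys_empty, PySem.Set.update_nil_left]
  -- B's dict is a fold of fresh inserts over the distinct prefixes
  have hfresh : ∀ p ∈ (PySem.Set.ofList (K.map Prod.fst) : List String),
      (PySem.Dict.empty : PySem.Dict String (PySem.Dict String Int)).contains p = false :=
    fun p _ => PySem.Dict.contains_empty p
  have hnodP : ((PySem.Set.ofList (K.map Prod.fst) : List String).map id).Nodup := by
    simp [PySem.Set.nodup_ofList]
  have hB2 := PySem.Dict.items_foldl_insert_fresh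
      (PySem.Set.ofList (K.map Prod.fst) : List String) id
      (fun p => PySem.Dict.counter ((K.filter (fun q => q.1 == p)).map Prod.snd))
      (PySem.Dict.empty : PySem.Dict String (PySem.Dict String Int)) hfresh hnodP
  simp only [id] at hB2
  rw [hB2]
  show _ = ((PySem.Dict.empty : PySem.Dict String (PySem.Dict String Int)).items ++ _).map _
  rw [show (PySem.Dict.empty : PySem.Dict String (PySem.Dict String Int)).items = [] from rfl,
      List.nil_append, List.map_map, List.map_map]
  apply List.map_congr_left
  intro p _
  simp only [Function.comp]
  congr 1
  -- A's inner dict at prefix p has the same items as Counter(filtered suffixes)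
  rw [pv_getD_foldl_modify K Prod.fst PySem.Dict.empty
        (fun q => fun (i : PySem.Dict String Int) => i.modify q.2 0 (· + 1)) PySem.Dict.empty p]
  rw [PySem.Dict.getD_empty]
  rw [PySem.Dict.counter_eq_foldl, List.foldl_map]
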